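-- pv_equiv track=rewrite | github.com/kkr010128/codebert | problem052/problem052_76.py | func
-- ===== SOURCE A (Python) =====
-- def func(n):
--     i = 1
--     dst = ""
--
--     def include3(x, i):
--         local_dst = ""
--
--         if x % 10 == 3:
--             local_dst += " " + str(i)
--         else:
--             if x // 10:
--                 local_dst += include3(x // 10, i)
--
--         return local_dst
--
--     while i <= n:
--         x = i
--         if x % 3 == 0:
--             dst += " " + str(i)
--         else:
--             dst += include3(x, i)
--         i += 1
--
--     return dst
-- ===== SOURCE B (Python) =====
-- def func(n):
--     return ''.join(' ' + str(i) for i in range(1, n + 1)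
--                    if i % 3 == 0 or '3' in str(i))
-- ===== Notes on version B (the rewrite author's own statement) =====
-- stated objective: simpler
-- what changed: The while-loop with a quadratic string += accumulator and the recursive digit-by-digit helper include3 are replaced by a single comprehension over range(1,n+1) filtered by the substring test '3' in str(i), joined once with ''.join.
import Mathlib
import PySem

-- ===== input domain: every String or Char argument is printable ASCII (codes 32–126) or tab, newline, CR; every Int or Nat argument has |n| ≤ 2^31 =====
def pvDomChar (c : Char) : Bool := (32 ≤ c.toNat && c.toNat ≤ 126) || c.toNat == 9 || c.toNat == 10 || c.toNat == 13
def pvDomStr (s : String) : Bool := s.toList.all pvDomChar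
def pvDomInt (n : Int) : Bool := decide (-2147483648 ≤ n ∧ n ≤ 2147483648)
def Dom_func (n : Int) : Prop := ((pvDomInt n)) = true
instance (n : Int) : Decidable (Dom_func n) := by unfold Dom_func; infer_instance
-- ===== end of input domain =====

-- B replaces A's while-loop string accumulator and recursive digit-scanning helper by one
-- filtered comprehension joined once (objective: simpler; same return value).

-- ===== PORT A =====
-- include3 is only ever called with x = i ≥ 1, so x is a Nat here; on nonnegative
-- arguments Nat's % and / are exactly Python's % and //.
def include3 (x : Nat) (i : Int) : String :=
  if x % 10 = 3 then "" ++ (" " ++ PySem.Int.toStr i)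
  else if x / 10 ≠ 0 then "" ++ include3 (x / 10) i
  else ""
termination_by x
decreasing_by omega

def funcGo (n i : Int) (dst : String) : String :=
  if i ≤ n then
    funcGo n (i + 1)
      (if PySem.Int.mod i 3 = 0 then dst ++ (" " ++ PySem.Int.toStr i)
       else dst ++ include3 i.toNat i)
  else dst
termination_by (n + 1 - i).toNat
decreasing_by omega

def func (n : Int) : String := funcGo n 1 ""

-- ===== PORT B =====
def func_alt (n : Int) : String :=
  PySem.Str.join ""
    (((PySem.List.pyRange 1 (n + 1) 1).filter
        (fun i => PySem.Int.mod i 3 == 0 || PySem.Str.isIn "3" (PySem.Int.toStr i))).map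
      (fun i => " " ++ PySem.Int.toStr i))

-- ===== PRECONDITION & SPEC =====
def Spec_func (n : Int) (out : String) : Prop := out = func_alt n
instance (n : Int) (out : String) : Decidable (Spec_func n out) := by unfold Spec_func; infer_instance

-- ===== CLAIM (what is proved, stated in full; the proofs are below) =====
def Claim_equal_func : Prop := ∀ (n : Int), Dom_func n → Spec_func n (func n)

-- ===== LEMMAS AND PROOFS =====

-- whether the decimal digits of x contain a 3 (mirrors include3's recursion)
def has3 (x : Nat) : Bool :=
  (x % 10 == 3) || (if x / 10 ≠ 0 then has3 (x / 10) else false)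
termination_by x
decreasing_by omega

theorem include3_eq (x : Nat) (i : Int) :
    include3 x i = if has3 x then " " ++ PySem.Int.toStr i else "" := by
  fun_induction include3 x i with
  | case1 x h => rw [has3]; simp [h]
  | case2 x h h2 ih => rw [has3]; simp [h, h2, ih]
  | case3 x h h2 => rw [has3]; simp [h, h2]

theorem digitChar_eq_three (d : Nat) (hd : d < 10) : ((Nat.digitChar d = '3') ↔ d = 3) := by
  interval_cases d <;> simp [Nat.digitChar]

theorem mem3_toDigitsCore (fuel : Nat) : ∀ (m : Nat) (ds : List Char), m < fuel →
    ('3' ∈ Nat.toDigitsCore 10 fuel m ds ↔ has3 m = true ∨ '3' ∈ ds) := by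
  induction fuel with
  | zero => omega
  | succ f ih =>
    intro m ds hm
    rw [Nat.toDigitsCore]
    by_cases h : m / 10 = 0
    · simp only [h]
      rw [has3]
      have := digitChar_eq_three (m % 10) (by omega)
      simp [h, eq_comm (a := '3'), this]
    · simp only [if_neg h]
      rw [ih (m / 10) _ (by omega)]
      conv_rhs => rw [has3]
      have := digitChar_eq_three (m % 10) (by omega)
      simp [h, eq_comm (a := '3'), this]
      tauto

theorem singleton_infix_iff (c : Char) (l : List Char) : [c] <:+: l ↔ c ∈ l := by
  constructor
  · intro h; exact h.subset (List.mem_singleton_self c)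
  · intro h
    obtain ⟨s, t, rfl⟩ := List.append_of_mem h
    exact ⟨s, t, by simp⟩

theorem isIn3_eq_has3 (m : Nat) :
    PySem.Str.isIn "3" (PySem.Int.toStr (m : Int)) = has3 m := by
  have h1 : (PySem.Int.toStr (m : Int)).toList = Nat.toDigits 10 m := by
    simp [PySem.Int.toList_toStr, PySem.Int.toChars]
  rw [show PySem.Str.isIn "3" (PySem.Int.toStr (m : Int))
        = PySem.Chars.isIn "3".toList (PySem.Int.toStr (m : Int)).toList from rfl, h1]
  by_cases hb : has3 m = true
  · rw [hb]
    rw [PySem.Chars.isIn_iff_infix]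
    rw [show ("3".toList : List Char) = ['3'] from rfl, singleton_infix_iff]
    rw [Nat.toDigits]
    exact ((mem3_toDigitsCore (m + 1) m [] (by omega)).2 (Or.inl hb))
  · simp only [Bool.not_eq_true] at hb
    rw [hb]
    rw [show (PySem.Chars.isIn "3".toList (Nat.toDigits 10 m) = false) ↔ _ from
      PySem.Chars.isIn_eq_false_iff _ _]
    rw [show ("3".toList : List Char) = ['3'] from rfl, singleton_infix_iff]
    intro hmem
    rw [Nat.toDigits] at hmem
    rcases (mem3_toDigitsCore (m + 1) m [] (by omega)).1 hmem with h | h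
    · rw [hb] at h; exact absurd h (by simp)
    · simp at h

theorem join_empty_cons (a : String) (l : List String) :
    PySem.Str.join "" (a :: l) = a ++ PySem.Str.join "" l := by
  cases l with
  | nil => simp [PySem.Str.join, PySem.Chars.join, List.intercalate]
  | cons b t => simp [PySem.Str.join, PySem.Chars.join, List.intercalate]

theorem funcGo_eq (fuel : Nat) : ∀ (n i : Int), 1 ≤ i → (n + 1 - i).toNat ≤ fuel →
    ∀ dst : String, funcGo n i dst = dst ++
      PySem.Str.join ""
        (((PySem.List.pyRange i (n + 1) 1).filter
            (fun j => PySem.Int.mod j 3 == 0 || PySem.Str.isIn "3" (PySem.Int.toStr j))).map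
          (fun j => " " ++ PySem.Int.toStr j)) := by
  induction fuel with
  | zero =>
    intro n i hi hf dst
    rw [funcGo, if_neg (by omega), PySem.List.pyRange_one_eq_nil (by omega)]
    simp [PySem.Str.join, PySem.Chars.join, List.intercalate]
  | succ f ih =>
    intro n i hi hf dst
    by_cases hle : i ≤ n
    · rw [funcGo, if_pos hle, ih n (i + 1) (by omega) (by omega)]
      rw [PySem.List.pyRange_one_cons (by omega : i < n + 1), List.filter_cons]
      have htoNat : ((i.toNat : Nat) : Int) = i := Int.toNat_of_nonneg (by omega)
      by_cases hm : PySem.Int.mod i 3 = 0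
      · rw [if_pos hm]
        have : (PySem.Int.mod i 3 == 0 || PySem.Str.isIn "3" (PySem.Int.toStr i)) = true := by
          rw [hm]; simp
        rw [if_pos this, List.map_cons, join_empty_cons]
        simp [String.append_assoc]
      · rw [if_neg hm]
        have hiso := isIn3_eq_has3 i.toNat
        rw [htoNat] at hiso
        rw [include3_eq]
        by_cases h3 : has3 i.toNat = true
        · have : (PySem.Int.mod i 3 == 0 || PySem.Str.isIn "3" (PySem.Int.toStr i)) = true := by
            rw [hiso, h3, Bool.or_true]
          rw [if_pos this, List.map_cons, join_empty_cons, if_pos h3]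
          simp [String.append_assoc]
        · have : ¬ ((PySem.Int.mod i 3 == 0 || PySem.Str.isIn "3" (PySem.Int.toStr i)) = true) := by
            rw [Bool.not_eq_true] at h3
            rw [hiso, h3, Bool.or_false]
            simp only [beq_iff_eq]
            exact hm
          rw [if_neg this, if_neg h3]
          simp
    · rw [funcGo, if_neg hle, PySem.List.pyRange_one_eq_nil (by omega)]
      simp [PySem.Str.join, PySem.Chars.join, List.intercalate]

-- ===== VERDICT (by name: the statement is the Claim_ definition above) =====
theorem func_spec : Claim_equal_func := by
  intro n _
  unfold Spec_func func func_alt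
  rw [funcGo_eq (n + 1 - 1).toNat n 1 (by omega) (by omega) ""]
  simp
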